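-- pv_equiv track=rewrite | github.com/HG12265/CineBook | app.py | create_seat_layout
-- ===== SOURCE A (Python) =====
-- def create_seat_layout(rows, cols, seat_categories=None):
--     # Create a 2D list (grid) with plain Python
--     layout = [[0 for _ in range(int(cols))] for _ in range(int(rows))]
--     if seat_categories:
--         for cat, positions in seat_categories.items():
--             for r, c in positions:
--                 if 0 <= r < int(rows) and 0 <= c < int(cols):
--                     if cat.lower() == "premium": layout[r][c] = 2
--                     elif cat.lower() == "vip": layout[r][c] = 4
--     return layout
-- ===== SOURCE B (Python) =====
-- def create_seat_layout(rows, cols, seat_categories=None):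
--     # Cell-driven pull: keep recognised (mark, position-set) pairs in reverse
--     # insertion order, then compute every cell independently by searching them
--     # (first hit = last write in A's order). No grid mutation at all.
--     R, C = int(rows), int(cols)
--     marks = {"premium": 2, "vip": 4}
--     cats = []
--     for cat, positions in (seat_categories or {}).items():
--         m = marks.get(cat.lower())
--         if m is not None:
--             cats.append((m, set(positions)))
--     cats.reverse()
--
--     def mark_at(r, c):
--         for m, pos in cats:
--             if (r, c) in pos:
--                 return m
--         return 0
--
--     return [[mark_at(r, c) for c in range(C)] for r in range(R)]
-- ===== Notes on version B (the rewrite author's own statement) =====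
-- stated objective: alternative
-- what changed: B never allocates or mutates a grid: it keeps the recognised categories as (mark, position-set) pairs in reverse insertion order and computes each cell independently as the first set containing it (first hit in reverse order = last write in A), a cell-driven pull instead of A's position-driven writes into a zero grid.
import Mathlib
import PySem

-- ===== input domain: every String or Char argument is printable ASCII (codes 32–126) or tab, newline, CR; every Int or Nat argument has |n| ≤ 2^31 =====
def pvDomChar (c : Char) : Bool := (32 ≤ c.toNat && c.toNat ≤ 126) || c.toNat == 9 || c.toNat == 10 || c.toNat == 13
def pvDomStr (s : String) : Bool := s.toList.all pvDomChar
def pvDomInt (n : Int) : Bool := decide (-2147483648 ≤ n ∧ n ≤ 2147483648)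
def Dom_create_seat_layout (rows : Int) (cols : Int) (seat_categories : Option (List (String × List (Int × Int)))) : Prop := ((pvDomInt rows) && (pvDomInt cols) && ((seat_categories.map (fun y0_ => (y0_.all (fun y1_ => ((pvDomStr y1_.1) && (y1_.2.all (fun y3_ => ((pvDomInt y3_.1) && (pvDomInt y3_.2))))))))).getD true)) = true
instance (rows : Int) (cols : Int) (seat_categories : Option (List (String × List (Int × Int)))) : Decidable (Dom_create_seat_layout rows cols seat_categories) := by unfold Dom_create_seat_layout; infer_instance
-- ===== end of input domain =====

-- B replaces A's zero grid mutated position-by-position with a cell-driven pull: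
-- recognised (mark, position-set) pairs kept in reverse order, each cell computed
-- independently as the first set containing it; alternative decomposition, same result.


-- ===== PORT A =====
-- layout[r][c] = v  (A's guard guarantees r,c are in range, so List.set is exact)
def setCell (g : List (List Int)) (r c : Nat) (v : Int) : List (List Int) :=
  g.set r ((g.getD r []).set c v)

def create_seat_layout (rows : Int) (cols : Int) (seat_categories : Option (List (String × List (Int × Int)))) : List (List Int) :=
  let layout := (PySem.List.pyRange 0 rows 1).map
    (fun _ => (PySem.List.pyRange 0 cols 1).map (fun _ => (0 : Int)))
  -- `if seat_categories:` — falsy for None and for the empty dict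
  if (match seat_categories with | none => false | some l => !l.isEmpty) then
    (seat_categories.getD []).foldl (fun g p =>
      p.2.foldl (fun g rc =>
        if 0 ≤ rc.1 ∧ rc.1 < rows ∧ 0 ≤ rc.2 ∧ rc.2 < cols then
          if PySem.Str.lower p.1 = "premium" then setCell g rc.1.toNat rc.2.toNat 2
          else if PySem.Str.lower p.1 = "vip" then setCell g rc.1.toNat rc.2.toNat 4
          else g
        else g) g) layout
  else layout

-- ===== PORT B =====
-- `for m, pos in cats: if (r, c) in pos: return m` / `return 0`
def markAt (cats : List (Int × PySem.Set (Int × Int))) (r c : Int) : Int :=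
  match cats with
  | [] => 0
  | (m, s) :: rest => if (r, c) ∈ s then m else markAt rest r c

def create_seat_layout_alt (rows : Int) (cols : Int) (seat_categories : Option (List (String × List (Int × Int)))) : List (List Int) :=
  let cats := ((seat_categories.getD []).foldl (fun acc p =>
    match (PySem.Dict.ofList [("premium", (2 : Int)), ("vip", 4)]).get? (PySem.Str.lower p.1) with
    | some m => acc ++ [(m, PySem.Set.ofList p.2)]
    | none => acc) []).reverse
  (PySem.List.pyRange 0 rows 1).map (fun r =>
    (PySem.List.pyRange 0 cols 1).map (fun c => markAt cats r c))

-- ===== PRECONDITION & SPEC =====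
def Spec_create_seat_layout (rows : Int) (cols : Int) (seat_categories : Option (List (String × List (Int × Int)))) (out : List (List Int)) : Prop := out = create_seat_layout_alt rows cols seat_categories
instance (rows : Int) (cols : Int) (seat_categories : Option (List (String × List (Int × Int)))) (out : List (List Int)) : Decidable (Spec_create_seat_layout rows cols seat_categories out) := by unfold Spec_create_seat_layout; infer_instance

-- ===== CLAIM (what is proved, stated in full; the proofs are below) =====
def Claim_equal_create_seat_layout : Prop := ∀ (rows : Int) (cols : Int) (seat_categories : Option (List (String × List (Int × Int)))), Dom_create_seat_layout rows cols seat_categories → Spec_create_seat_layout rows cols seat_categories (create_seat_layout rows cols seat_categories)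

-- ===== LEMMAS AND PROOFS =====

-- the grid whose cell (r, c) is f r c
def gridI (rows cols : Int) (f : Int → Int → Int) : List (List Int) :=
  (List.range rows.toNat).map (fun (i : Nat) =>
    (List.range cols.toNat).map (fun (j : Nat) => f (i : Int) (j : Int)))

-- the per-category builder of B ("fcat")
def fcat (p : String × List (Int × Int)) : List (Int × PySem.Set (Int × Int)) :=
  match (PySem.Dict.ofList [("premium", (2 : Int)), ("vip", 4)]).get? (PySem.Str.lower p.1) with
  | some m => [(m, PySem.Set.ofList p.2)]
  | none => []

theorem gridI_congr (rows cols : Int) (f g : Int → Int → Int)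
    (h : ∀ r c : Int, 0 ≤ r → r < rows → 0 ≤ c → c < cols → f r c = g r c) :
    gridI rows cols f = gridI rows cols g := by
  unfold gridI
  apply List.map_congr_left
  intro i hi
  apply List.map_congr_left
  intro j hj
  simp only [List.mem_range] at hi hj
  exact h i j (by omega) (by omega) (by omega) (by omega)

theorem setCell_gridI (rows cols r c : Int) (f : Int → Int → Int) (v : Int)
    (hr0 : 0 ≤ r) (hr : r < rows) (hc0 : 0 ≤ c) (hc : c < cols) :
    setCell (gridI rows cols f) r.toNat c.toNat v
      = gridI rows cols (fun a b => if a = r ∧ b = c then v else f a b) := by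
  unfold setCell gridI
  have hrn : r.toNat < rows.toNat := by omega
  have hget : ((List.range rows.toNat).map (fun (i : Nat) =>
        (List.range cols.toNat).map (fun (j : Nat) => f (i : Int) (j : Int)))).getD r.toNat []
      = (List.range cols.toNat).map (fun (j : Nat) => f r (j : Int)) := by
    rw [List.getD_eq_getElem _ _ (by simpa using hrn)]
    simp [Int.toNat_of_nonneg hr0]
  rw [hget]
  apply List.ext_getElem
  · simp
  · intro i h1 h2
    rw [List.getElem_set]
    simp only [List.getElem_map, List.getElem_range]
    by_cases hi : r.toNat = i
    · subst hi
      rw [if_pos rfl]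
      apply List.ext_getElem
      · simp
      · intro j j1 j2
        rw [List.getElem_set]
        simp only [List.getElem_map, List.getElem_range]
        by_cases hj : c.toNat = j
        · subst hj
          rw [if_pos rfl, if_pos ⟨by omega, by omega⟩]
        · rw [if_neg hj, if_neg (by push_neg; intro h; omega)]
          congr 1
          omega
    · rw [if_neg hi]
      apply List.map_congr_left
      intro j _
      rw [if_neg (by push_neg; intro h; omega)]

-- one category's position loop, recognised mark v, acting on a cell-function grid
theorem inner_loop (rows cols : Int) (v : Int) (pos : List (Int × Int))
    (f : Int → Int → Int) :
    pos.foldl (fun g rc =>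
        if 0 ≤ rc.1 ∧ rc.1 < rows ∧ 0 ≤ rc.2 ∧ rc.2 < cols then
          setCell g rc.1.toNat rc.2.toNat v else g) (gridI rows cols f)
      = gridI rows cols (fun a b => if (a, b) ∈ pos then v else f a b) := by
  induction pos generalizing f with
  | nil => simp
  | cons rc rest ih =>
    simp only [List.foldl_cons]
    by_cases hb : 0 ≤ rc.1 ∧ rc.1 < rows ∧ 0 ≤ rc.2 ∧ rc.2 < cols
    · rw [if_pos hb, setCell_gridI rows cols rc.1 rc.2 f v hb.1 hb.2.1 hb.2.2.1 hb.2.2.2,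
        ih]
      congr 1
      funext a b
      by_cases h1 : (a, b) ∈ rest
      · simp [h1]
      · by_cases h2 : a = rc.1 ∧ b = rc.2
        · have hmem : (a, b) = rc := by rw [Prod.ext_iff]; exact h2
          simp [h2, hmem]
        · have hmem : ¬ (a, b) = rc := by rw [Prod.ext_iff]; exact h2
          simp [h1, h2, hmem]
    · rw [if_neg hb, ih]
      apply gridI_congr
      intro a c ha0 ha hc0 hc
      have hne : ¬ (a, c) = rc := by
        rw [Prod.ext_iff]; push_neg; intro h1 h2; exact hb ⟨h1 ▸ ha0, h1 ▸ ha, h2 ▸ hc0, h2 ▸ hc⟩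
      simp [List.mem_cons, hne]

-- the whole category loop: A's writes realise markAt on the reversed recognised list
theorem outer_loop (rows cols : Int) (l : List (String × List (Int × Int)))
    (cats : List (Int × PySem.Set (Int × Int))) :
    l.foldl (fun g p =>
      p.2.foldl (fun g rc =>
        if 0 ≤ rc.1 ∧ rc.1 < rows ∧ 0 ≤ rc.2 ∧ rc.2 < cols then
          if PySem.Str.lower p.1 = "premium" then setCell g rc.1.toNat rc.2.toNat 2
          else if PySem.Str.lower p.1 = "vip" then setCell g rc.1.toNat rc.2.toNat 4
          else g
        else g) g) (gridI rows cols (markAt cats))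
      = gridI rows cols (markAt ((l.flatMap fcat).reverse ++ cats)) := by
  induction l generalizing cats with
  | nil => simp
  | cons p rest ih =>
    simp only [List.foldl_cons, List.flatMap_cons, List.reverse_append, List.append_assoc]
    by_cases hp : PySem.Str.lower p.1 = "premium"
    · have hget : (PySem.Dict.ofList [("premium", (2 : Int)), ("vip", 4)]).get? (PySem.Str.lower p.1) = some 2 := by
        rw [hp]; rfl
      have hstep : (fun (g : List (List Int)) (rc : Int × Int) =>
          if 0 ≤ rc.1 ∧ rc.1 < rows ∧ 0 ≤ rc.2 ∧ rc.2 < cols then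
            if PySem.Str.lower p.1 = "premium" then setCell g rc.1.toNat rc.2.toNat 2
            else if PySem.Str.lower p.1 = "vip" then setCell g rc.1.toNat rc.2.toNat 4
            else g
          else g)
          = (fun (g : List (List Int)) (rc : Int × Int) =>
            if 0 ≤ rc.1 ∧ rc.1 < rows ∧ 0 ≤ rc.2 ∧ rc.2 < cols then
              setCell g rc.1.toNat rc.2.toNat 2 else g) := by
        funext g rc; simp [hp]
      rw [hstep, inner_loop rows cols 2 p.2 (markAt cats)]
      have hmk : (fun a b => if (a, b) ∈ p.2 then (2 : Int) else markAt cats a b)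
          = markAt ((2, PySem.Set.ofList p.2) :: cats) := by
        funext a b
        simp [markAt, PySem.Set.mem_ofList]
      rw [hmk, ih ((2, PySem.Set.ofList p.2) :: cats)]
      simp [fcat, hget]
    · by_cases hv : PySem.Str.lower p.1 = "vip"
      · have hget : (PySem.Dict.ofList [("premium", (2 : Int)), ("vip", 4)]).get? (PySem.Str.lower p.1) = some 4 := by
          rw [hv]; rfl
        have hstep : (fun (g : List (List Int)) (rc : Int × Int) =>
            if 0 ≤ rc.1 ∧ rc.1 < rows ∧ 0 ≤ rc.2 ∧ rc.2 < cols then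
              if PySem.Str.lower p.1 = "premium" then setCell g rc.1.toNat rc.2.toNat 2
              else if PySem.Str.lower p.1 = "vip" then setCell g rc.1.toNat rc.2.toNat 4
              else g
            else g)
            = (fun (g : List (List Int)) (rc : Int × Int) =>
              if 0 ≤ rc.1 ∧ rc.1 < rows ∧ 0 ≤ rc.2 ∧ rc.2 < cols then
                setCell g rc.1.toNat rc.2.toNat 4 else g) := by
          funext g rc; simp [hp, hv]
        rw [hstep, inner_loop rows cols 4 p.2 (markAt cats)]
        have hmk : (fun a b => if (a, b) ∈ p.2 then (4 : Int) else markAt cats a b)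
            = markAt ((4, PySem.Set.ofList p.2) :: cats) := by
          funext a b
          simp [markAt, PySem.Set.mem_ofList]
        rw [hmk, ih ((4, PySem.Set.ofList p.2) :: cats)]
        simp [fcat, hget]
      · have hget : (PySem.Dict.ofList [("premium", (2 : Int)), ("vip", 4)]).get? (PySem.Str.lower p.1) = none := by
          rw [show PySem.Dict.ofList [("premium", (2 : Int)), ("vip", 4)]
              = PySem.Dict.mk [("premium", 2), ("vip", 4)] from rfl,
            PySem.Dict.get?_mk_cons, PySem.Dict.get?_mk_cons]
          rw [if_neg (by simp [beq_iff_eq]; intro h; exact hp h.symm),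
            if_neg (by simp [beq_iff_eq]; intro h; exact hv h.symm)]
          rfl
        have hnoop : p.2.foldl (fun g rc =>
            if 0 ≤ rc.1 ∧ rc.1 < rows ∧ 0 ≤ rc.2 ∧ rc.2 < cols then
              if PySem.Str.lower p.1 = "premium" then setCell g rc.1.toNat rc.2.toNat 2
              else if PySem.Str.lower p.1 = "vip" then setCell g rc.1.toNat rc.2.toNat 4
              else g
            else g) (gridI rows cols (markAt cats)) = gridI rows cols (markAt cats) := by
          simp [hp, hv]
        rw [hnoop, ih cats]
        simp [fcat, hget]

-- B's builder fold is the flatMap of fcat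
theorem build_eq_flatMap (l : List (String × List (Int × Int))) :
    l.foldl (fun acc p =>
      match (PySem.Dict.ofList [("premium", (2 : Int)), ("vip", 4)]).get? (PySem.Str.lower p.1) with
      | some m => acc ++ [(m, PySem.Set.ofList p.2)]
      | none => acc) [] = l.flatMap fcat := by
  have h : (fun (acc : List (Int × PySem.Set (Int × Int))) p =>
      match (PySem.Dict.ofList [("premium", (2 : Int)), ("vip", 4)]).get? (PySem.Str.lower p.1) with
      | some m => acc ++ [(m, PySem.Set.ofList p.2)]
      | none => acc)
      = (fun acc p => acc ++ fcat p) := by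
    funext acc p
    unfold fcat
    cases (PySem.Dict.ofList [("premium", (2 : Int)), ("vip", 4)]).get? (PySem.Str.lower p.1) <;> simp
  rw [h, PySem.List.foldl_append_eq_flatMap]
  simp

-- the zero layout / B's emitting pass, as gridI
theorem zero_layout (rows cols : Int) :
    (PySem.List.pyRange 0 rows 1).map
      (fun _ => (PySem.List.pyRange 0 cols 1).map (fun _ => (0 : Int)))
      = gridI rows cols (markAt []) := by
  simp [gridI, PySem.List.pyRange_one, markAt, Function.comp_def]

theorem emit_eq (rows cols : Int) (cats : List (Int × PySem.Set (Int × Int))) :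
    (PySem.List.pyRange 0 rows 1).map (fun r =>
      (PySem.List.pyRange 0 cols 1).map (fun c => markAt cats r c))
      = gridI rows cols (markAt cats) := by
  simp [gridI, PySem.List.pyRange_one, Function.comp_def]

theorem main_eq (rows cols : Int) (sc : Option (List (String × List (Int × Int)))) :
    create_seat_layout rows cols sc = create_seat_layout_alt rows cols sc := by
  cases sc with
  | none =>
    simp only [create_seat_layout, create_seat_layout_alt, Option.getD_none, List.foldl_nil,
      List.reverse_nil, Bool.false_eq_true, if_false, zero_layout, emit_eq]
  | some l =>
    cases l with
    | nil =>
      simp only [create_seat_layout, create_seat_layout_alt, Option.getD_some, List.foldl_nil,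
        List.isEmpty_nil, Bool.not_true, Bool.false_eq_true, if_false, List.reverse_nil,
        zero_layout, emit_eq]
    | cons a t =>
      simp only [create_seat_layout, create_seat_layout_alt, Option.getD_some, build_eq_flatMap,
        List.isEmpty_cons, Bool.not_false, if_true, zero_layout, emit_eq]
      have h := outer_loop rows cols (a :: t) []
      rw [List.append_nil] at h
      exact h

-- ===== VERDICT (by name: the statement is the Claim_ definition above) =====
theorem create_seat_layout_spec : Claim_equal_create_seat_layout := by
  intro rows cols sc _
  exact main_eq rows cols sc
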